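-- pv_equiv track=rewrite | github.com/CyberMakaron/6-sem | Теория надёжности/lab6.py | uniCompinations
-- ===== SOURCE A (Python) =====
-- def uniCompinations(combinations, k, set_):
--     res = []
--     for comb in combinations:
--         t = set()
--         for j in range(len(set_)):
--             if j in comb:
--                 t = t | set_[j]
--         res.append(t)
--     return res
-- ===== SOURCE B (Python) =====
-- def uniCompinations(combinations, k, set_):
--     n = len(set_)
--     return [set().union(*(set_[j] for j in sorted(set(comb)) if 0 <= j < n))
--             for comb in combinations]
-- ===== Notes on version B (the rewrite author's own statement) =====
-- stated objective: faster
-- what changed: A scans every index of set_ per combination and tests membership in comb, accumulating with repeated set unions; B builds each result in one shot as set().union over the sets selected by the sorted distinct in-range indices of comb, so the cost per combination no longer depends on len(set_).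
import Mathlib
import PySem

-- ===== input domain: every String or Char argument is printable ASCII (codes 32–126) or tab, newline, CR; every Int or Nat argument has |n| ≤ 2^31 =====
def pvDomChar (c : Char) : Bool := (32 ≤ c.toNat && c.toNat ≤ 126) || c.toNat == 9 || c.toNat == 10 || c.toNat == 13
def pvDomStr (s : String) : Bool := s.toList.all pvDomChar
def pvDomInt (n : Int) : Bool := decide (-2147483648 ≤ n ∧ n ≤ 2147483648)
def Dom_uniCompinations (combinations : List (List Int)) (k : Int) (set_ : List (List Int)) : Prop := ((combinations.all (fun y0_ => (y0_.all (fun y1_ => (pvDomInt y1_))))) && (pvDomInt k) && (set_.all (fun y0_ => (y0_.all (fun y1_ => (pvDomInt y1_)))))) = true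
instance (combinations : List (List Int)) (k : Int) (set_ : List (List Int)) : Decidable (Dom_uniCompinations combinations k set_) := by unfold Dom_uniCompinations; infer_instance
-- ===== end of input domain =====

-- B builds each result set in one shot from the sets selected by the sorted distinct
-- in-range indices of comb, instead of scanning every index of set_ with a membership
-- test and accumulating by repeated unions: per-combination cost independent of len(set_).

-- ===== PORT A =====
-- res = []; for comb: t = set(); for j in range(len(set_)): if j in comb: t = t | set_[j]; res.append(t)
def uniCompinations (combinations : List (List Int)) (k : Int) (set_ : List (List Int)) : List (List Int) :=
  combinations.foldl
    (fun res comb =>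
      res ++ [(PySem.List.pyRange 0 (set_.length : Int) 1).foldl
        (fun t j => if j ∈ comb then PySem.Set.union t (PySem.List.pyGetD set_ j []) else t)
        PySem.Set.empty])
    []

-- ===== PORT B =====
-- [set().union(*(set_[j] for j in sorted(set(comb)) if 0 <= j < n)) for comb in combinations]
def uniCompinations_alt (combinations : List (List Int)) (k : Int) (set_ : List (List Int)) : List (List Int) :=
  let n : Int := (set_.length : Int)
  combinations.map (fun comb =>
    PySem.Set.ofList
      (((PySem.List.sorted (PySem.Set.ofList comb) (fun x => x)).filter
          (fun j => decide (0 ≤ j ∧ j < n))).flatMap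
        (fun j => PySem.List.pyGetD set_ j [])))

-- ===== PRECONDITION & SPEC =====
def Spec_uniCompinations (combinations : List (List Int)) (k : Int) (set_ : List (List Int)) (out : List (List Int)) : Prop := out = uniCompinations_alt combinations k set_
instance (combinations : List (List Int)) (k : Int) (set_ : List (List Int)) (out : List (List Int)) : Decidable (Spec_uniCompinations combinations k set_ out) := by unfold Spec_uniCompinations; infer_instance

-- ===== CLAIM (what is proved, stated in full; the proofs are below) =====
def Claim_equal_uniCompinations : Prop := ∀ (combinations : List (List Int)) (k : Int) (set_ : List (List Int)), Dom_uniCompinations combinations k set_ → Spec_uniCompinations combinations k set_ (uniCompinations combinations k set_)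

-- ===== LEMMAS AND PROOFS =====

-- pyRange with step 1 is strictly increasing
lemma pyRange_one_pairwise_lt (a b : Int) :
    List.Pairwise (· < ·) (PySem.List.pyRange a b 1) := by
  by_cases h : a < b
  · rw [PySem.List.pyRange_one_cons h]
    have ih := pyRange_one_pairwise_lt (a + 1) b
    refine List.Pairwise.cons ?_ ih
    intro x hx
    have := PySem.List.mem_pyRange_one.1 hx
    omega
  · have : PySem.List.pyRange a b 1 = [] := by
      simp [PySem.List.pyRange]; omega
    simp [this]
termination_by (b - a).toNat
decreasing_by omega

-- two strictly increasing Int lists with the same members are equal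
lemma eq_of_pairwise_lt_of_mem_iff (l₁ l₂ : List Int)
    (h₁ : List.Pairwise (· < ·) l₁) (h₂ : List.Pairwise (· < ·) l₂)
    (hm : ∀ x, x ∈ l₁ ↔ x ∈ l₂) : l₁ = l₂ := by
  have nd₁ : l₁.Nodup := h₁.imp (fun h => ne_of_lt h)
  have nd₂ : l₂.Nodup := h₂.imp (fun h => ne_of_lt h)
  exact ((List.perm_ext_iff_of_nodup nd₁ nd₂).2 hm).eq_of_pairwise
    (fun a b _ _ h h' => absurd h' (not_lt.2 h.le)) h₁ h₂

-- the index list A's inner loop selects equals the one B's generator runs over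
lemma index_lists_eq (comb : List Int) (n : Int) :
    (PySem.List.pyRange 0 n 1).filter (fun j => decide (j ∈ comb)) =
    (PySem.List.sorted (PySem.Set.ofList comb) (fun x => x)).filter
      (fun j => decide (0 ≤ j ∧ j < n)) := by
  apply eq_of_pairwise_lt_of_mem_iff
  · exact (pyRange_one_pairwise_lt 0 n).filter _
  · exact (PySem.List.sorted_ofList_pairwise_lt comb).filter _
  · intro x
    have hperm := PySem.List.sorted_perm (PySem.Set.ofList comb) (fun x => x) false
    simp only [List.mem_filter, PySem.List.mem_pyRange_one, hperm.mem_iff,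
      PySem.Set.mem_ofList, decide_eq_true_eq]
    tauto

-- accumulating unions of g j over a list = one update by the flattened selection
lemma foldl_union_eq_update (l : List Int) (g : Int → List Int) (s : PySem.Set Int) :
    l.foldl (fun t j => PySem.Set.union t (g j)) s = PySem.Set.update s (l.flatMap g) := by
  induction l generalizing s with
  | nil => simp [PySem.Set.update]
  | cons a l ih =>
    rw [List.foldl_cons, ih, List.flatMap_cons,
        show PySem.Set.union s (g a) = PySem.Set.update s (g a) from rfl,
        ← PySem.Set.update_append]

-- ===== VERDICT (by name: the statement is the Claim_ definition above) =====
theorem uniCompinations_spec : Claim_equal_uniCompinations := by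
  intro combinations k set_ _
  unfold Spec_uniCompinations uniCompinations uniCompinations_alt
  rw [PySem.List.foldl_append_singleton_eq_map]
  simp only [List.nil_append]
  apply List.map_congr_left
  intro comb _
  rw [PySem.List.foldl_ite_eq_foldl_filter (fun j => j ∈ comb),
      foldl_union_eq_update, index_lists_eq]
  exact PySem.Set.update_nil_left _
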